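-- pv_equiv track=rewrite | github.com/PlasmaControl/DESC | desc/potential_functions.py | segment_array
-- ===== SOURCE A (Python) =====
-- def segment_array(array_size, num_segments):
--     """
--     Divide an array of given size into specified number of segments.
--     Returns a list of tuples containing (start_index, end_index) for each segment.
--     """
--     if array_size < 0 or num_segments <= 0:
--         return []
--
--     segment_size = array_size // num_segments
--     remainder = array_size % num_segments
--     segments = []
--     current_index = 0
--
--     for i in range(num_segments):
--         # Calculate segment length, distributing remainder across initial segments
--         current_segment_size = segment_size + (1 if i < remainder else 0)
--         if current_segment_size > 0:  # Only add non-empty segments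
--             segments.append((current_index, current_index + current_segment_size - 1))
--             current_index += current_segment_size
--
--     return segments
-- ===== SOURCE B (Python) =====
-- def segment_array(array_size, num_segments):
--     """
--     Divide an array of given size into specified number of segments.
--     Returns a list of tuples containing (start_index, end_index) for each segment.
--     Closed-form version: each segment's bounds are computed directly from its
--     index, with no running accumulator.
--     """
--     if array_size < 0 or num_segments <= 0:
--         return []
--     q, r = divmod(array_size, num_segments)
--     # number of non-empty segments: all of them when q > 0, else only the first r
--     n = num_segments if q > 0 else r
--     return [(i * q + min(i, r), (i + 1) * q + min(i + 1, r) - 1) for i in range(n)]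
-- ===== Notes on version B (the rewrite author's own statement) =====
-- stated objective: alternative
-- what changed: Replaces the stateful loop threading a current_index accumulator and per-iteration emptiness test with a stateless comprehension: the count of non-empty segments is computed up front and each segment's (start, end) is a closed-form expression i*q + min(i, r) of its index.
import Mathlib
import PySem

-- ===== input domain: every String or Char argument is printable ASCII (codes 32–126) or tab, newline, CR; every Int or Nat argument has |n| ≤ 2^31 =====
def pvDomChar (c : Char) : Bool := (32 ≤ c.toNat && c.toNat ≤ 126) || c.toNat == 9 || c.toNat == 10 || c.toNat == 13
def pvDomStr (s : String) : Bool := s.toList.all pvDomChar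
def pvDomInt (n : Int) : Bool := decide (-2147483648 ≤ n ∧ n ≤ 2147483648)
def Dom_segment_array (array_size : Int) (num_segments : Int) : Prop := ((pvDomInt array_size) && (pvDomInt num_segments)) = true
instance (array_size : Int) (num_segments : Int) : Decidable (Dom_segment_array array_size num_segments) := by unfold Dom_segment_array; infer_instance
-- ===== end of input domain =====

-- B replaces A's stateful loop (running current_index, per-iteration emptiness test) with a
-- stateless closed-form comprehension; objective: alternative decomposition, same cost.

-- ===== PORT A =====
-- literal transliteration of A: guard, then a fold over range(num_segments) threading
-- (segments, current_index), appending only non-empty segments.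
def segment_array (array_size : Int) (num_segments : Int) : List (Int × Int) :=
  if array_size < 0 ∨ num_segments ≤ 0 then []
  else
    let segment_size := PySem.Int.floordiv array_size num_segments
    let remainder := PySem.Int.mod array_size num_segments
    let st := (PySem.List.pyRange 0 num_segments 1).foldl
      (fun (st : List (Int × Int) × Int) i =>
        let s := segment_size + (if i < remainder then 1 else 0)
        if s > 0 then (st.1 ++ [(st.2, st.2 + s - 1)], st.2 + s) else st)
      ([], 0)
    st.1

-- ===== PORT B =====
-- literal transliteration of B: count of non-empty segments up front, then a map with
-- closed-form bounds i*q + min(i, r).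
def segment_array_alt (array_size : Int) (num_segments : Int) : List (Int × Int) :=
  if array_size < 0 ∨ num_segments ≤ 0 then []
  else
    let q := PySem.Int.floordiv array_size num_segments
    let r := PySem.Int.mod array_size num_segments
    let n := if q > 0 then num_segments else r
    (PySem.List.pyRange 0 n 1).map
      (fun i => (i * q + min i r, (i + 1) * q + min (i + 1) r - 1))

-- ===== PRECONDITION & SPEC =====
def Spec_segment_array (array_size : Int) (num_segments : Int) (out : List (Int × Int)) : Prop := out = segment_array_alt array_size num_segments
instance (array_size : Int) (num_segments : Int) (out : List (Int × Int)) : Decidable (Spec_segment_array array_size num_segments out) := by unfold Spec_segment_array; infer_instance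

-- ===== CLAIM (what is proved, stated in full; the proofs are below) =====
def Claim_equal_segment_array : Prop := ∀ (array_size : Int) (num_segments : Int), Dom_segment_array array_size num_segments → Spec_segment_array array_size num_segments (segment_array array_size num_segments)

-- ===== LEMMAS AND PROOFS =====

-- Loop invariant for A's fold: after the first k iterations the accumulated segments are
-- exactly B's closed-form map over the non-empty prefix, and current_index = k*q + min k r.
theorem seg_loop (q r : Int) (hq : 0 ≤ q) (hr : 0 ≤ r) (k : Nat) :
    (PySem.List.pyRange 0 k 1).foldl
      (fun (st : List (Int × Int) × Int) i =>
        let s := q + (if i < r then 1 else 0)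
        if s > 0 then (st.1 ++ [(st.2, st.2 + s - 1)], st.2 + s) else st) ([], 0)
    = ((PySem.List.pyRange 0 (if q > 0 then (k : Int) else min (k : Int) r) 1).map
         (fun i => (i * q + min i r, (i + 1) * q + min (i + 1) r - 1)),
       (k : Int) * q + min (k : Int) r) := by
  induction k with
  | zero =>
      rw [Nat.cast_zero, PySem.List.pyRange_one_eq_nil (le_refl 0)]
      have hc : (if q > 0 then (0 : Int) else min 0 r) = 0 := by split_ifs <;> omega
      rw [hc, PySem.List.pyRange_one_eq_nil (le_refl 0)]
      simp only [List.foldl_nil, List.map_nil, Prod.mk.injEq, true_and]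
      omega
  | succ k ih =>
      rw [show ((k + 1 : Nat) : Int) = (k : Int) + 1 by push_cast; ring,
        PySem.List.pyRange_one_succ_right (by exact_mod_cast Nat.zero_le k),
        List.foldl_append, ih]
      simp only [List.foldl_cons, List.foldl_nil]
      have hm1 : min ((k : Int) + 1) r = min (k : Int) r + (if (k : Int) < r then 1 else 0) := by
        split_ifs <;> omega
      by_cases hpos : q + (if (k : Int) < r then 1 else 0) > 0
      · -- segment k is non-empty: appended; the non-empty prefix count so far is exactly k
        rw [if_pos hpos]
        have hck : (if q > 0 then (k : Int) else min (k : Int) r) = (k : Int) := by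
          split_ifs at hpos ⊢ with h1 h2 <;> omega
        have hc : (if q > 0 then (k : Int) + 1 else min ((k : Int) + 1) r) = (k : Int) + 1 := by
          split_ifs at hpos ⊢ with h1 h2 <;> omega
        rw [hck, hc, PySem.List.pyRange_one_succ_right (by exact_mod_cast Nat.zero_le k),
          List.map_append]
        refine Prod.ext ?_ ?_
        · simp only [List.map_cons, List.map_nil, List.append_cancel_left_eq,
            List.cons.injEq, and_true, Prod.mk.injEq, true_and]
          rw [hm1]; split_ifs <;> ring
        · simp only
          rw [hm1]; split_ifs <;> ring
      · -- segment k is empty: state unchanged (only possible when q = 0 and k ≥ r)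
        rw [if_neg hpos]
        have hq0 : q = 0 := by split_ifs at hpos <;> omega
        have hkr : ¬ (k : Int) < r := by split_ifs at hpos <;> omega
        have hc : (if q > 0 then (k : Int) + 1 else min ((k : Int) + 1) r)
            = (if q > 0 then (k : Int) else min (k : Int) r) := by
          split_ifs with h <;> omega
        rw [hc]
        refine Prod.ext rfl ?_
        simp only
        subst hq0; ring_nf; omega

-- seg_loop restated with an Int upper bound, the form the verdict proof needs.
theorem seg_loop' (q r m : Int) (hq : 0 ≤ q) (hr : 0 ≤ r) (hm : 0 ≤ m) :
    (PySem.List.pyRange 0 m 1).foldl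
      (fun (st : List (Int × Int) × Int) i =>
        let s := q + (if i < r then 1 else 0)
        if s > 0 then (st.1 ++ [(st.2, st.2 + s - 1)], st.2 + s) else st) ([], 0)
    = ((PySem.List.pyRange 0 (if q > 0 then m else min m r) 1).map
         (fun i => (i * q + min i r, (i + 1) * q + min (i + 1) r - 1)),
       m * q + min m r) := by
  have hk : ((m.toNat : Nat) : Int) = m := Int.toNat_of_nonneg hm
  rw [← hk]
  exact seg_loop q r hq hr m.toNat

-- ===== VERDICT (by name: the statement is the Claim_ definition above) =====
theorem segment_array_spec : Claim_equal_segment_array := by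
  intro a n _
  unfold Spec_segment_array segment_array segment_array_alt
  by_cases hg : a < 0 ∨ n ≤ 0
  · simp [hg]
  · rw [if_neg hg, if_neg hg]
    rw [not_or, not_lt, not_le] at hg
    obtain ⟨ha, hn⟩ := hg
    have hq : 0 ≤ PySem.Int.floordiv a n := by
      rw [PySem.Int.floordiv_eq_ediv_of_pos hn]
      exact Int.ediv_nonneg ha (le_of_lt hn)
    have hr0 : 0 ≤ PySem.Int.mod a n := PySem.Int.mod_nonneg a hn
    have hrn : PySem.Int.mod a n < n := PySem.Int.mod_lt a hn
    have hmin : min n (PySem.Int.mod a n) = PySem.Int.mod a n := by omega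
    simp only [seg_loop' (PySem.Int.floordiv a n) (PySem.Int.mod a n) n hq hr0
      (le_of_lt hn), hmin]
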